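-- pv_equiv track=rewrite | github.com/Asilva-01/Validadores-Municipais | SIGISS_Antigravity/validador_sigiss.py | is_valid_cnpj
-- ===== SOURCE A (Python) =====
-- def is_valid_cnpj(cnpj):
--     if len(cnpj) != 14 or not cnpj.isdigit() or cnpj == cnpj[0] * 14:
--         return False
--     def calc_digit(cnpj_str, weights):
--         s = sum(int(d) * w for d, w in zip(cnpj_str, weights))
--         d = 11 - (s % 11)
--         return str(0 if d >= 10 else d)
--     w1 = [5, 4, 3, 2, 9, 8, 7, 6, 5, 4, 3, 2]
--     w2 = [6] + w1
--     d1 = calc_digit(cnpj[:12], w1)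
--     d2 = calc_digit(cnpj[:12] + d1, w2)
--     return cnpj[-2:] == d1 + d2
-- ===== SOURCE B (Python) =====
-- def is_valid_cnpj(cnpj):
--     if len(cnpj) != 14 or not cnpj.isdigit() or cnpj == cnpj[0] * 14:
--         return False
--     # Single fused pass over the 12 base digits, right to left, with the weight
--     # given by the closed form 2 + j % 8 (j = distance from the right end).
--     # s1 is the first checksum; s2 accumulates the second checksum's contribution
--     # of the base digits (each one position further from the right), and the
--     # first check digit is folded into s2 arithmetically afterwards.
--     s1 = 0
--     s2 = 0
--     for j in range(12):
--         d = int(cnpj[11 - j])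
--         s1 += d * (2 + j % 8)
--         s2 += d * (2 + (j + 1) % 8)
--     r1 = 11 - s1 % 11
--     d1 = 0 if r1 >= 10 else r1
--     r2 = 11 - (s2 + 2 * d1) % 11
--     d2 = 0 if r2 >= 10 else r2
--     return cnpj[12:] == f"{d1}{d2}"
-- ===== Notes on version B (the rewrite author's own statement) =====
-- stated objective: alternative
-- what changed: A makes two staged zip-with-weight-table passes (the second over a rebuilt 13-char string containing the first check digit); B makes one fused right-to-left pass over the 12 base digits maintaining both checksums at once with the closed-form weight 2 + j % 8 (no weight tables, no rebuilt string), then folds the first check digit into the second checksum arithmetically.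
import Mathlib
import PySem

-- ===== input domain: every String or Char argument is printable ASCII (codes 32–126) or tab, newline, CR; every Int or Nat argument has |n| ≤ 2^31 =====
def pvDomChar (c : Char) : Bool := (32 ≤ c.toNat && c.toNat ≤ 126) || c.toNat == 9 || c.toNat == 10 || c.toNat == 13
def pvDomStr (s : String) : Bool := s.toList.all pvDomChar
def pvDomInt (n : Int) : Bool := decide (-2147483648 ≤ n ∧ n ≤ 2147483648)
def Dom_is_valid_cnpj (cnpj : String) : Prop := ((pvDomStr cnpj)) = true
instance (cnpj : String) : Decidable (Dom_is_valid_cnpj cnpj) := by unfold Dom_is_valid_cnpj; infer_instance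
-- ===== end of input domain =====

-- B replaces A's two staged zip-with-weight-table passes by one fused right-to-left pass with the
-- closed-form weight 2 + j % 8, folding the first check digit into the second checksum arithmetically.


-- ===== PORT A =====
def pvCalcDigit (cs : List Char) (weights : List Int) : List Char :=
  let s : Int := ((cs.zip weights).map (fun p => (PySem.Int.ofChars? [p.1]).getD 0 * p.2)).sum
  let d : Int := 11 - PySem.Int.mod s 11
  PySem.Int.toChars (if 10 ≤ d then 0 else d)

def pvValidA (cs : List Char) : Bool :=
  match cs with
  | [] => false
  | c0 :: _ =>
    if cs.length ≠ 14 || !PySem.Chars.strIsdigit cs || cs == List.replicate 14 c0 then false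
    else
      let w1 : List Int := [5, 4, 3, 2, 9, 8, 7, 6, 5, 4, 3, 2]
      let w2 : List Int := 6 :: w1
      let d1 := pvCalcDigit (PySem.List.slice cs none (some 12)) w1
      let d2 := pvCalcDigit (PySem.List.slice cs none (some 12) ++ d1) w2
      PySem.List.slice cs (some (-2)) none == d1 ++ d2

def is_valid_cnpj (cnpj : String) : Bool := pvValidA cnpj.toList

-- ===== PORT B =====
def pvValidB (cs : List Char) : Bool :=
  match cs with
  | [] => false
  | c0 :: _ =>
    if cs.length ≠ 14 || !PySem.Chars.strIsdigit cs || cs == List.replicate 14 c0 then false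
    else
      let p := (PySem.List.pyRange 0 12 1).foldl (fun (acc : Int × Int) j =>
          let d : Int := (PySem.Int.ofChars? (PySem.List.pyGet? cs (11 - j)).toList).getD 0
          (acc.1 + d * (2 + PySem.Int.mod j 8), acc.2 + d * (2 + PySem.Int.mod (j + 1) 8)))
        ((0 : Int), (0 : Int))
      let r1 : Int := 11 - PySem.Int.mod p.1 11
      let d1 : Int := if 10 ≤ r1 then 0 else r1
      let r2 : Int := 11 - PySem.Int.mod (p.2 + 2 * d1) 11
      let d2 : Int := if 10 ≤ r2 then 0 else r2
      PySem.List.slice cs (some 12) none == PySem.Int.toChars d1 ++ PySem.Int.toChars d2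

def is_valid_cnpj_alt (cnpj : String) : Bool := pvValidB cnpj.toList

-- ===== PRECONDITION & SPEC =====
def Spec_is_valid_cnpj (cnpj : String) (out : Bool) : Prop := out = is_valid_cnpj_alt cnpj
instance (cnpj : String) (out : Bool) : Decidable (Spec_is_valid_cnpj cnpj out) := by unfold Spec_is_valid_cnpj; infer_instance

-- ===== CLAIM =====
def Claim_equal_is_valid_cnpj : Prop := ∀ (cnpj : String), Dom_is_valid_cnpj cnpj → Spec_is_valid_cnpj cnpj (is_valid_cnpj cnpj)

-- ===== LEMMAS AND PROOFS =====
lemma toChars_digit (d : Int) (h0 : 0 ≤ d) (h9 : d < 10) :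
    ∃ c, PySem.Int.toChars d = [c] ∧ (PySem.Int.ofChars? [c]).getD 0 = d := by
  interval_cases d
  · exact ⟨'0', by decide, by decide⟩
  · exact ⟨'1', by decide, by decide⟩
  · exact ⟨'2', by decide, by decide⟩
  · exact ⟨'3', by decide, by decide⟩
  · exact ⟨'4', by decide, by decide⟩
  · exact ⟨'5', by decide, by decide⟩
  · exact ⟨'6', by decide, by decide⟩
  · exact ⟨'7', by decide, by decide⟩
  · exact ⟨'8', by decide, by decide⟩
  · exact ⟨'9', by decide, by decide⟩

lemma validA_eq_validB (cs : List Char) : pvValidA cs = pvValidB cs := by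
  cases cs with
  | nil => rfl
  | cons c0 rest =>
    simp only [pvValidA, pvValidB]
    by_cases hg : ((c0 :: rest).length ≠ 14 || !PySem.Chars.strIsdigit (c0 :: rest) || (c0 :: rest) == List.replicate 14 c0) = true
    · simp only [hg, if_true]
    · have hlen : rest.length = 13 := by
        simp only [Bool.or_eq_true, not_or] at hg
        have h1 := hg.1
        simp only [ne_eq, decide_eq_true_eq, List.length_cons] at h1
        omega
      rw [if_neg hg, if_neg hg]
      obtain ⟨c1, rest, rfl⟩ : ∃ x xs, rest = x :: xs := by cases rest with | nil => simp at hlen | cons a b => exact ⟨a, b, rfl⟩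
      obtain ⟨c2, rest, rfl⟩ : ∃ x xs, rest = x :: xs := by cases rest with | nil => simp at hlen | cons a b => exact ⟨a, b, rfl⟩
      obtain ⟨c3, rest, rfl⟩ : ∃ x xs, rest = x :: xs := by cases rest with | nil => simp at hlen | cons a b => exact ⟨a, b, rfl⟩
      obtain ⟨c4, rest, rfl⟩ : ∃ x xs, rest = x :: xs := by cases rest with | nil => simp at hlen | cons a b => exact ⟨a, b, rfl⟩
      obtain ⟨c5, rest, rfl⟩ : ∃ x xs, rest = x :: xs := by cases rest with | nil => simp at hlen | cons a b => exact ⟨a, b, rfl⟩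
      obtain ⟨c6, rest, rfl⟩ : ∃ x xs, rest = x :: xs := by cases rest with | nil => simp at hlen | cons a b => exact ⟨a, b, rfl⟩
      obtain ⟨c7, rest, rfl⟩ : ∃ x xs, rest = x :: xs := by cases rest with | nil => simp at hlen | cons a b => exact ⟨a, b, rfl⟩
      obtain ⟨c8, rest, rfl⟩ : ∃ x xs, rest = x :: xs := by cases rest with | nil => simp at hlen | cons a b => exact ⟨a, b, rfl⟩
      obtain ⟨c9, rest, rfl⟩ : ∃ x xs, rest = x :: xs := by cases rest with | nil => simp at hlen | cons a b => exact ⟨a, b, rfl⟩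
      obtain ⟨c10, rest, rfl⟩ : ∃ x xs, rest = x :: xs := by cases rest with | nil => simp at hlen | cons a b => exact ⟨a, b, rfl⟩
      obtain ⟨c11, rest, rfl⟩ : ∃ x xs, rest = x :: xs := by cases rest with | nil => simp at hlen | cons a b => exact ⟨a, b, rfl⟩
      obtain ⟨c12, rest, rfl⟩ : ∃ x xs, rest = x :: xs := by cases rest with | nil => simp at hlen | cons a b => exact ⟨a, b, rfl⟩
      obtain ⟨c13, rest, rfl⟩ : ∃ x xs, rest = x :: xs := by cases rest with | nil => simp at hlen | cons a b => exact ⟨a, b, rfl⟩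
      obtain rfl : rest = [] := by cases rest with | nil => rfl | cons a b => simp at hlen
      have hsl1 : PySem.List.slice [c0, c1, c2, c3, c4, c5, c6, c7, c8, c9, c10, c11, c12, c13] none (some 12) = [c0, c1, c2, c3, c4, c5, c6, c7, c8, c9, c10, c11] := rfl
      have hsl2 : PySem.List.slice [c0, c1, c2, c3, c4, c5, c6, c7, c8, c9, c10, c11, c12, c13] (some (-2)) none = [c12, c13] := rfl
      have hsl3 : PySem.List.slice [c0, c1, c2, c3, c4, c5, c6, c7, c8, c9, c10, c11, c12, c13] (some 12) none = [c12, c13] := rfl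
      have hrange : PySem.List.pyRange 0 12 1 = [0, 1, 2, 3, 4, 5, 6, 7, 8, 9, 10, 11] := rfl
      rw [hsl1, hsl2, hsl3, hrange]
      simp only [List.foldl]
      have hp0 : (PySem.Int.ofChars? (PySem.List.pyGet? [c0, c1, c2, c3, c4, c5, c6, c7, c8, c9, c10, c11, c12, c13] (11 - 0)).toList).getD 0 = (PySem.Int.ofChars? [c11]).getD 0 := rfl
      have hp1 : (PySem.Int.ofChars? (PySem.List.pyGet? [c0, c1, c2, c3, c4, c5, c6, c7, c8, c9, c10, c11, c12, c13] (11 - 1)).toList).getD 0 = (PySem.Int.ofChars? [c10]).getD 0 := rfl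
      have hp2 : (PySem.Int.ofChars? (PySem.List.pyGet? [c0, c1, c2, c3, c4, c5, c6, c7, c8, c9, c10, c11, c12, c13] (11 - 2)).toList).getD 0 = (PySem.Int.ofChars? [c9]).getD 0 := rfl
      have hp3 : (PySem.Int.ofChars? (PySem.List.pyGet? [c0, c1, c2, c3, c4, c5, c6, c7, c8, c9, c10, c11, c12, c13] (11 - 3)).toList).getD 0 = (PySem.Int.ofChars? [c8]).getD 0 := rfl
      have hp4 : (PySem.Int.ofChars? (PySem.List.pyGet? [c0, c1, c2, c3, c4, c5, c6, c7, c8, c9, c10, c11, c12, c13] (11 - 4)).toList).getD 0 = (PySem.Int.ofChars? [c7]).getD 0 := rfl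
      have hp5 : (PySem.Int.ofChars? (PySem.List.pyGet? [c0, c1, c2, c3, c4, c5, c6, c7, c8, c9, c10, c11, c12, c13] (11 - 5)).toList).getD 0 = (PySem.Int.ofChars? [c6]).getD 0 := rfl
      have hp6 : (PySem.Int.ofChars? (PySem.List.pyGet? [c0, c1, c2, c3, c4, c5, c6, c7, c8, c9, c10, c11, c12, c13] (11 - 6)).toList).getD 0 = (PySem.Int.ofChars? [c5]).getD 0 := rfl
      have hp7 : (PySem.Int.ofChars? (PySem.List.pyGet? [c0, c1, c2, c3, c4, c5, c6, c7, c8, c9, c10, c11, c12, c13] (11 - 7)).toList).getD 0 = (PySem.Int.ofChars? [c4]).getD 0 := rfl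
      have hp8 : (PySem.Int.ofChars? (PySem.List.pyGet? [c0, c1, c2, c3, c4, c5, c6, c7, c8, c9, c10, c11, c12, c13] (11 - 8)).toList).getD 0 = (PySem.Int.ofChars? [c3]).getD 0 := rfl
      have hp9 : (PySem.Int.ofChars? (PySem.List.pyGet? [c0, c1, c2, c3, c4, c5, c6, c7, c8, c9, c10, c11, c12, c13] (11 - 9)).toList).getD 0 = (PySem.Int.ofChars? [c2]).getD 0 := rfl
      have hp10 : (PySem.Int.ofChars? (PySem.List.pyGet? [c0, c1, c2, c3, c4, c5, c6, c7, c8, c9, c10, c11, c12, c13] (11 - 10)).toList).getD 0 = (PySem.Int.ofChars? [c1]).getD 0 := rfl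
      have hp11 : (PySem.Int.ofChars? (PySem.List.pyGet? [c0, c1, c2, c3, c4, c5, c6, c7, c8, c9, c10, c11, c12, c13] (11 - 11)).toList).getD 0 = (PySem.Int.ofChars? [c0]).getD 0 := rfl
      rw [hp0, hp1, hp2, hp3, hp4, hp5, hp6, hp7, hp8, hp9, hp10, hp11]
      simp only [pvCalcDigit, List.zip_cons_cons, List.zip_nil_right, List.map_cons, List.map_nil,
        List.sum_cons, List.sum_nil, add_zero,
        show (2 + PySem.Int.mod (0 : Int) 8 : Int) = 2 from by decide,
        show (2 + PySem.Int.mod ((0 : Int) + 1) 8 : Int) = 3 from by decide,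
        show (2 + PySem.Int.mod (1 : Int) 8 : Int) = 3 from by decide,
        show (2 + PySem.Int.mod ((1 : Int) + 1) 8 : Int) = 4 from by decide,
        show (2 + PySem.Int.mod (2 : Int) 8 : Int) = 4 from by decide,
        show (2 + PySem.Int.mod ((2 : Int) + 1) 8 : Int) = 5 from by decide,
        show (2 + PySem.Int.mod (3 : Int) 8 : Int) = 5 from by decide,
        show (2 + PySem.Int.mod ((3 : Int) + 1) 8 : Int) = 6 from by decide,
        show (2 + PySem.Int.mod (4 : Int) 8 : Int) = 6 from by decide,
        show (2 + PySem.Int.mod ((4 : Int) + 1) 8 : Int) = 7 from by decide,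
        show (2 + PySem.Int.mod (5 : Int) 8 : Int) = 7 from by decide,
        show (2 + PySem.Int.mod ((5 : Int) + 1) 8 : Int) = 8 from by decide,
        show (2 + PySem.Int.mod (6 : Int) 8 : Int) = 8 from by decide,
        show (2 + PySem.Int.mod ((6 : Int) + 1) 8 : Int) = 9 from by decide,
        show (2 + PySem.Int.mod (7 : Int) 8 : Int) = 9 from by decide,
        show (2 + PySem.Int.mod ((7 : Int) + 1) 8 : Int) = 2 from by decide,
        show (2 + PySem.Int.mod (8 : Int) 8 : Int) = 2 from by decide,
        show (2 + PySem.Int.mod ((8 : Int) + 1) 8 : Int) = 3 from by decide,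
        show (2 + PySem.Int.mod (9 : Int) 8 : Int) = 3 from by decide,
        show (2 + PySem.Int.mod ((9 : Int) + 1) 8 : Int) = 4 from by decide,
        show (2 + PySem.Int.mod (10 : Int) 8 : Int) = 4 from by decide,
        show (2 + PySem.Int.mod ((10 : Int) + 1) 8 : Int) = 5 from by decide,
        show (2 + PySem.Int.mod (11 : Int) 8 : Int) = 5 from by decide,
        show (2 + PySem.Int.mod ((11 : Int) + 1) 8 : Int) = 6 from by decide]
      generalize hv0 : (PySem.Int.ofChars? [c0]).getD 0 = v0
      generalize hv1 : (PySem.Int.ofChars? [c1]).getD 0 = v1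
      generalize hv2 : (PySem.Int.ofChars? [c2]).getD 0 = v2
      generalize hv3 : (PySem.Int.ofChars? [c3]).getD 0 = v3
      generalize hv4 : (PySem.Int.ofChars? [c4]).getD 0 = v4
      generalize hv5 : (PySem.Int.ofChars? [c5]).getD 0 = v5
      generalize hv6 : (PySem.Int.ofChars? [c6]).getD 0 = v6
      generalize hv7 : (PySem.Int.ofChars? [c7]).getD 0 = v7
      generalize hv8 : (PySem.Int.ofChars? [c8]).getD 0 = v8
      generalize hv9 : (PySem.Int.ofChars? [c9]).getD 0 = v9
      generalize hv10 : (PySem.Int.ofChars? [c10]).getD 0 = v10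
      generalize hv11 : (PySem.Int.ofChars? [c11]).getD 0 = v11
      have hS1 : (0 + v11 * 2 + v10 * 3 + v9 * 4 + v8 * 5 + v7 * 6 + v6 * 7 + v5 * 8 + v4 * 9 + v3 * 2 + v2 * 3 + v1 * 4 + v0 * 5 : Int) = v0 * 5 + (v1 * 4 + (v2 * 3 + (v3 * 2 + (v4 * 9 + (v5 * 8 + (v6 * 7 + (v7 * 6 + (v8 * 5 + (v9 * 4 + (v10 * 3 + (v11 * 2))))))))))) := by ring
      rw [hS1]
      generalize hm1 : PySem.Int.mod (v0 * 5 + (v1 * 4 + (v2 * 3 + (v3 * 2 + (v4 * 9 + (v5 * 8 + (v6 * 7 + (v7 * 6 + (v8 * 5 + (v9 * 4 + (v10 * 3 + (v11 * 2))))))))))) : Int) 11 = m1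
      have hm1a : 0 ≤ m1 := hm1 ▸ PySem.Int.mod_nonneg _ (by norm_num)
      have hm1b : m1 < 11 := hm1 ▸ PySem.Int.mod_lt _ (by norm_num)
      have hd0 : (0 : Int) ≤ if 10 ≤ 11 - m1 then (0 : Int) else 11 - m1 := by split <;> omega
      have hd9 : (if 10 ≤ 11 - m1 then (0 : Int) else 11 - m1) < 10 := by split <;> omega
      generalize hd : (if 10 ≤ 11 - m1 then (0 : Int) else 11 - m1) = d1 at hd0 hd9 ⊢
      obtain ⟨ch, hch1, hch2⟩ := toChars_digit d1 hd0 hd9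
      rw [hch1]
      simp only [List.cons_append, List.nil_append, List.zip_cons_cons, List.zip_nil_right,
        List.map_cons, List.map_nil, List.sum_cons, List.sum_nil, add_zero]
      rw [hch2, hv0, hv1, hv2, hv3, hv4, hv5, hv6, hv7, hv8, hv9, hv10, hv11]
      have hS2 : (0 + v11 * 3 + v10 * 4 + v9 * 5 + v8 * 6 + v7 * 7 + v6 * 8 + v5 * 9 + v4 * 2 + v3 * 3 + v2 * 4 + v1 * 5 + v0 * 6 + 2 * d1 : Int) = v0 * 6 + (v1 * 5 + (v2 * 4 + (v3 * 3 + (v4 * 2 + (v5 * 9 + (v6 * 8 + (v7 * 7 + (v8 * 6 + (v9 * 5 + (v10 * 4 + (v11 * 3 + (d1 * 2)))))))))))) := by ring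
      rw [hS2]

-- ===== VERDICT =====
theorem is_valid_cnpj_spec : Claim_equal_is_valid_cnpj := by
  intro cnpj _
  unfold Spec_is_valid_cnpj
  exact validA_eq_validB cnpj.toList
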